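-- pv_equiv track=rewrite | github.com/ReliaQuest/content | Packs/DigitalShadows/Integrations/DigitalShadowsV2/DigitalShadowsV2.py | get_comments_map
-- ===== SOURCE A (Python) =====
-- UPDATED = 'updated'
--
-- TRIAGE_ITEM_ID = 'triage-item-id'
--
-- def get_comments_map(triage_item_comments):
--     comment_map = {}
--     for comment in triage_item_comments:
--         if comment[TRIAGE_ITEM_ID] in comment_map:
--             comment_map[comment[TRIAGE_ITEM_ID]].append(comment)
--         else:
--             comment_map[comment[TRIAGE_ITEM_ID]] = [comment]
--     sorted_comment_map = {key: sorted(comments, key=lambda x: x[UPDATED], reverse=True) for key, comments in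
--                           comment_map.items()}
--     # Keeping only latest 10 comments
--     latest_10_comments_map = {key: comments[:10] for key, comments in
--                               sorted_comment_map.items()}
--
--     return latest_10_comments_map
-- ===== SOURCE B (Python) =====
-- UPDATED = 'updated'
-- TRIAGE_ITEM_ID = 'triage-item-id'
--
-- def get_comments_map(triage_item_comments):
--     # Seed the keys in first-appearance order, then make ONE pass over the
--     # globally sorted list, appending to a bucket only while it holds < 10:
--     # each bucket comes out already sorted and truncated, no per-group sort.
--     comment_map = {comment[TRIAGE_ITEM_ID]: [] for comment in triage_item_comments}
--     for comment in sorted(triage_item_comments, key=lambda x: x[UPDATED], reverse=True):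
--         bucket = comment_map[comment[TRIAGE_ITEM_ID]]
--         if len(bucket) < 10:
--             bucket.append(comment)
--     return comment_map
-- ===== Notes on version B (the rewrite author's own statement) =====
-- stated objective: alternative
-- what changed: Instead of grouping into a dict and then sorting and truncating each group, B seeds the keys in first-appearance order, sorts the whole list once (stable, descending by 'updated'), and fills each bucket in a single pass while it holds fewer than 10 comments, so buckets come out already sorted and truncated with no per-group sort.
import Mathlib
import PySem

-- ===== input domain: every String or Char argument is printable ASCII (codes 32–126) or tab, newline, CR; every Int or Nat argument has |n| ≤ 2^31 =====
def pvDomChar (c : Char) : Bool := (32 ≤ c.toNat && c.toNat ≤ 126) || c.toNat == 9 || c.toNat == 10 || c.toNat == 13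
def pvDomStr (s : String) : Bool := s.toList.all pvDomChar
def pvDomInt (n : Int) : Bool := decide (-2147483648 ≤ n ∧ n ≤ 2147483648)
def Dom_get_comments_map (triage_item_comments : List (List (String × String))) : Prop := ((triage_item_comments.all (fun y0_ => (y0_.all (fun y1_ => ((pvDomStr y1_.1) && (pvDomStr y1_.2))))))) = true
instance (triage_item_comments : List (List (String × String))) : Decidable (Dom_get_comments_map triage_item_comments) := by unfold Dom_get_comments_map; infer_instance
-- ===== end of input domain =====

-- B groups by one global stable descending sort plus a single bounded-bucket pass instead of
-- A's group-then-sort-then-truncate; equal output (including dict key order) on Pre_.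

-- comment[KEY] on the dict `comment` (first-match association-list lookup); the `.getD ""`
-- default is never reached on Pre_ (Python raises KeyError there, excluded by Pre_).
def pvId (c : List (String × String)) : String := (List.lookup "triage-item-id" c).getD ""
def pvUpd (c : List (String × String)) : String := (List.lookup "updated" c).getD ""

-- ===== PORT A =====
-- loop body of A's grouping `for comment in triage_item_comments: …`
def pvStepA (m : PySem.Dict String (List (List (String × String)))) (comment : List (String × String)) : PySem.Dict String (List (List (String × String))) :=
  if m.contains (pvId comment) then
    m.modify (pvId comment) [] (fun l => l ++ [comment])   -- comment_map[id].append(comment)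
  else
    m.insert (pvId comment) [comment]

def get_comments_map (triage_item_comments : List (List (String × String))) : List (String × List (List (String × String))) :=
  let comment_map : PySem.Dict String (List (List (String × String))) :=
    triage_item_comments.foldl pvStepA PySem.Dict.empty
  let sorted_comment_map : PySem.Dict String (List (List (String × String))) :=
    PySem.Dict.mk (comment_map.items.map (fun kv => (kv.1, PySem.List.sorted kv.2 pvUpd true)))
  -- comments[:10] is List.take 10 (exact for a nonnegative literal stop)
  let latest_10_comments_map : PySem.Dict String (List (List (String × String))) :=
    PySem.Dict.mk (sorted_comment_map.items.map (fun kv => (kv.1, kv.2.take 10)))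
  latest_10_comments_map.items

-- ===== PORT B =====
-- loop body of B's single bounded-bucket pass over the globally sorted list
def pvStepB (m : PySem.Dict String (List (List (String × String)))) (comment : List (String × String)) : PySem.Dict String (List (List (String × String))) :=
  let bucket := m.getD (pvId comment) []
  if bucket.length < 10 then m.insert (pvId comment) (bucket ++ [comment]) else m

def get_comments_map_alt (triage_item_comments : List (List (String × String))) : List (String × List (List (String × String))) :=
  -- {comment[TRIAGE_ITEM_ID]: [] for comment in triage_item_comments}
  let comment_map0 : PySem.Dict String (List (List (String × String))) :=
    triage_item_comments.foldl (fun m comment => m.insert (pvId comment) []) PySem.Dict.empty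
  let srt := PySem.List.sorted triage_item_comments pvUpd true
  let comment_map := srt.foldl pvStepB comment_map0
  comment_map.items

-- ===== PRECONDITION & SPEC =====
-- Pre_ excludes exactly the inputs where the Python raises KeyError: a comment dict missing
-- the 'triage-item-id' or the 'updated' key (both A and B raise there).
def Pre_get_comments_map (triage_item_comments : List (List (String × String))) : Prop :=
  ∀ c ∈ triage_item_comments, (List.lookup "triage-item-id" c).isSome ∧ (List.lookup "updated" c).isSome
instance (triage_item_comments : List (List (String × String))) : Decidable (Pre_get_comments_map triage_item_comments) := by unfold Pre_get_comments_map; infer_instance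
def pvWitness_get_comments_map : (List (List (String × String))) := [[("triage-item-id", "a"), ("updated", "1")]]

def Spec_get_comments_map (triage_item_comments : List (List (String × String))) (out : List (String × List (List (String × String)))) : Prop := out = get_comments_map_alt triage_item_comments
instance (triage_item_comments : List (List (String × String))) (out : List (String × List (List (String × String)))) : Decidable (Spec_get_comments_map triage_item_comments out) := by unfold Spec_get_comments_map; infer_instance

-- ===== CLAIM (what is proved, stated in full; the proofs are below) =====
def Claim_equal_get_comments_map : Prop := ∀ (triage_item_comments : List (List (String × String))), Dom_get_comments_map triage_item_comments → Pre_get_comments_map triage_item_comments → Spec_get_comments_map triage_item_comments (get_comments_map triage_item_comments)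

-- ===== LEMMAS AND PROOFS =====

def pvIns (acc : List (List (String × String))) (x : List (String × String)) : List (List (String × String)) :=
  PySem.List.insertBy (fun a b => decide (pvUpd b < pvUpd a)) x acc

theorem pvIns_nil (x : List (String × String)) : pvIns [] x = [x] := rfl

theorem pvIns_cons (x y : List (String × String)) (ys : List (List (String × String))) :
    pvIns (y::ys) x = if pvUpd y < pvUpd x then x::y::ys else y :: pvIns ys x := by
  simp only [pvIns, PySem.List.insertBy]
  by_cases h : pvUpd y < pvUpd x <;> simp [h]

theorem pvIns_pairwise (x : List (String × String)) (l : List (List (String × String)))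
    (h : l.Pairwise (fun a b => pvUpd b ≤ pvUpd a)) :
    (pvIns l x).Pairwise (fun a b => pvUpd b ≤ pvUpd a) := by
  induction l with
  | nil => simp [pvIns_nil]
  | cons y ys ih =>
    rcases List.pairwise_cons.mp h with ⟨hy, hys⟩
    rw [pvIns_cons]
    by_cases hb : pvUpd y < pvUpd x
    · rw [if_pos hb]
      refine List.pairwise_cons.mpr ⟨?_, h⟩
      intro z hz
      rcases List.mem_cons.mp hz with rfl | hz
      · exact le_of_lt hb
      · exact le_trans (hy z hz) (le_of_lt hb)
    · rw [if_neg hb]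
      refine List.pairwise_cons.mpr ⟨?_, ih hys⟩
      intro z hz
      rcases (PySem.List.mem_insertBy _ _ _ _).mp hz with rfl | hz
      · exact le_of_not_gt hb
      · exact hy z hz

theorem pvIns_front (x : List (String × String)) (l : List (List (String × String)))
    (h : ∀ z ∈ l, pvUpd z < pvUpd x) : pvIns l x = x :: l := by
  cases l with
  | nil => exact pvIns_nil x
  | cons y ys => rw [pvIns_cons, if_pos (h y (List.mem_cons_self ..))]

theorem pvFilter_pvIns (p : List (String × String) → Bool) (x : List (String × String))
    (l : List (List (String × String))) (h : l.Pairwise (fun a b => pvUpd b ≤ pvUpd a)) :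
    (pvIns l x).filter p = if p x then pvIns (l.filter p) x else l.filter p := by
  induction l with
  | nil => by_cases hp : p x <;> simp [pvIns_nil, hp]
  | cons y ys ih =>
    rcases List.pairwise_cons.mp h with ⟨hy, hys⟩
    rw [pvIns_cons]
    by_cases hb : pvUpd y < pvUpd x
    · rw [if_pos hb]
      by_cases hpy : p y
      · by_cases hpx : p x <;>
          simp [hpy, hpx, pvIns_cons, hb]
      · by_cases hpx : p x
        · have hfront : pvIns (List.filter p ys) x = x :: List.filter p ys := by
            refine pvIns_front x _ ?_
            intro z hz
            exact lt_of_le_of_lt (hy z (List.mem_of_mem_filter hz)) hb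
          simp [hpy, hpx, hfront]
        · simp [hpy, hpx]
    · rw [if_neg hb]
      by_cases hpy : p y
      · by_cases hpx : p x <;>
          simp [hpy, hpx, pvIns_cons, hb, ih hys]
      · by_cases hpx : p x <;> simp [hpy, hpx, ih hys]

theorem pvFilter_foldl_ins (p : List (String × String) → Bool)
    (xs acc : List (List (String × String))) (h : acc.Pairwise (fun a b => pvUpd b ≤ pvUpd a)) :
    (xs.foldl pvIns acc).filter p = (xs.filter p).foldl pvIns (acc.filter p) := by
  induction xs generalizing acc with
  | nil => simp
  | cons x xs ih =>
    simp only [List.foldl_cons, List.filter_cons]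
    by_cases hpx : p x
    · rw [ih _ (pvIns_pairwise x acc h), pvFilter_pvIns p x acc h, if_pos hpx]
      simp [hpx]
    · rw [ih _ (pvIns_pairwise x acc h), pvFilter_pvIns p x acc h, if_neg hpx]
      simp [hpx]

theorem pvFilter_sorted (p : List (String × String) → Bool) (xs : List (List (String × String))) :
    (PySem.List.sorted xs pvUpd true).filter p = PySem.List.sorted (xs.filter p) pvUpd true := by
  rw [PySem.List.sorted_rev_eq_foldl_insertBy, PySem.List.sorted_rev_eq_foldl_insertBy]
  exact pvFilter_foldl_ins p xs [] (by simp)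

theorem pvContains_iff {ν : Type} (d : PySem.Dict String ν) (k : String) :
    d.contains k = true ↔ k ∈ d.items.map Prod.fst := by
  simp [PySem.Dict.contains, List.any_eq_true, List.mem_map, beq_iff_eq]

theorem pvMapFst_insert_of_contains {ν : Type} (d : PySem.Dict String ν) (k : String) (v : ν)
    (h : d.contains k = true) : (d.insert k v).items.map Prod.fst = d.items.map Prod.fst := by
  simp only [PySem.Dict.insert, h, if_true]
  simp only [List.map_map]
  refine List.map_congr_left ?_
  intro p _
  by_cases hp : p.1 = k <;> simp [hp]

theorem pvMapFst_insert_of_not_contains {ν : Type} (d : PySem.Dict String ν) (k : String) (v : ν)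
    (h : ¬ d.contains k = true) : (d.insert k v).items.map Prod.fst = d.items.map Prod.fst ++ [k] := by
  simp [PySem.Dict.insert, h]

theorem pvGet?_map_val {ν : Type} (L : List (String × ν)) (f : ν → ν) (k : String) :
    (PySem.Dict.mk (L.map (fun kv => (kv.1, f kv.2)))).get? k = ((PySem.Dict.mk L).get? k).map f := by
  simp only [PySem.Dict.get?, List.find?_map, Option.map_map]
  rfl

theorem pvAssoc_ext {ν : Type} (L M : List (String × ν))
    (hk : L.map Prod.fst = M.map Prod.fst) (hn : (L.map Prod.fst).Nodup)
    (h : ∀ k, (PySem.Dict.mk L).get? k = (PySem.Dict.mk M).get? k) : L = M := by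
  induction L generalizing M with
  | nil => cases M with
    | nil => rfl
    | cons q M => simp at hk
  | cons p L ih =>
    cases M with
    | nil => simp at hk
    | cons q M =>
      simp only [List.map_cons, List.cons.injEq] at hk
      obtain ⟨hk1, hk2⟩ := hk
      have hv : p.2 = q.2 := by
        have := h p.1
        simp [PySem.Dict.get?, List.find?, hk1] at this
        simpa using this
      simp only [List.map_cons, List.nodup_cons] at hn
      have hq : p = q := Prod.ext hk1 hv
      refine congrArg₂ (· :: ·) hq (ih M hk2 hn.2 ?_)
      intro k
      by_cases hkp : k = p.1
      · have h1 : (List.find? (fun r => r.1 == k) L) = none := by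
          refine List.find?_eq_none.mpr ?_
          intro r hr
          simp only [beq_iff_eq, hkp]
          intro hrk
          exact hn.1 (hrk ▸ List.mem_map_of_mem hr)
        have h2 : (List.find? (fun r => r.1 == k) M) = none := by
          refine List.find?_eq_none.mpr ?_
          intro r hr
          simp only [beq_iff_eq, hkp]
          intro hrk
          exact hn.1 (hk2 ▸ (hrk ▸ List.mem_map_of_mem hr))
        simp [PySem.Dict.get?, h1, h2]
      · have := h k
        simp only [PySem.Dict.get?, List.find?] at this ⊢
        have hne : (p.1 == k) = false := by simp [Ne.symm hkp]
        have hne' : (q.1 == k) = false := by rw [← hk1]; exact hne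
        rw [hne] at this
        rw [hne'] at this
        exact this

def pvKStep (ks : List String) (c : List (String × String)) : List String :=
  if pvId c ∈ ks then ks else ks ++ [pvId c]

theorem pvA_keys (xs : List (List (String × String))) (d : PySem.Dict String (List (List (String × String)))) :
    (xs.foldl pvStepA d).items.map Prod.fst = xs.foldl pvKStep (d.items.map Prod.fst) := by
  induction xs generalizing d with
  | nil => rfl
  | cons c xs ih =>
    simp only [List.foldl_cons]
    rw [ih]
    by_cases hc : d.contains (pvId c) = true
    · have hm : pvId c ∈ d.items.map Prod.fst := (pvContains_iff d _).mp hc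
      rw [show pvStepA d c = d.modify (pvId c) [] (fun l => l ++ [c]) from if_pos hc]
      rw [show pvKStep (d.items.map Prod.fst) c = d.items.map Prod.fst from if_pos hm]
      rw [PySem.Dict.modify, pvMapFst_insert_of_contains d _ _ hc]
    · have hm : pvId c ∉ d.items.map Prod.fst := fun hmem => hc ((pvContains_iff d _).mpr hmem)
      rw [show pvStepA d c = d.insert (pvId c) [c] from if_neg hc]
      rw [show pvKStep (d.items.map Prod.fst) c = d.items.map Prod.fst ++ [pvId c] from if_neg hm]
      rw [pvMapFst_insert_of_not_contains d _ _ hc]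

theorem pvSeed_keys (xs : List (List (String × String))) (d : PySem.Dict String (List (List (String × String)))) :
    (xs.foldl (fun m c => m.insert (pvId c) []) d).items.map Prod.fst = xs.foldl pvKStep (d.items.map Prod.fst) := by
  induction xs generalizing d with
  | nil => rfl
  | cons c xs ih =>
    simp only [List.foldl_cons]
    rw [ih]
    by_cases hc : d.contains (pvId c) = true
    · have hm : pvId c ∈ d.items.map Prod.fst := (pvContains_iff d _).mp hc
      rw [show pvKStep (d.items.map Prod.fst) c = d.items.map Prod.fst from if_pos hm]
      rw [pvMapFst_insert_of_contains d _ _ hc]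
    · have hm : pvId c ∉ d.items.map Prod.fst := fun hmem => hc ((pvContains_iff d _).mpr hmem)
      rw [show pvKStep (d.items.map Prod.fst) c = d.items.map Prod.fst ++ [pvId c] from if_neg hm]
      rw [pvMapFst_insert_of_not_contains d _ _ hc]

theorem pvB_keys (ys : List (List (String × String))) (m : PySem.Dict String (List (List (String × String))))
    (h : ∀ c ∈ ys, pvId c ∈ m.items.map Prod.fst) :
    (ys.foldl pvStepB m).items.map Prod.fst = m.items.map Prod.fst := by
  induction ys generalizing m with
  | nil => rfl
  | cons c ys ih =>
    simp only [List.foldl_cons]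
    have hc : m.contains (pvId c) = true := (pvContains_iff m _).mpr (h c (List.mem_cons_self ..))
    have hkeys : (pvStepB m c).items.map Prod.fst = m.items.map Prod.fst := by
      unfold pvStepB
      by_cases hl : (m.getD (pvId c) []).length < 10
      · simp only [hl, if_true]
        exact pvMapFst_insert_of_contains m _ _ hc
      · simp [hl]
    rw [ih _ (by rw [hkeys]; exact fun c' hc' => h c' (List.mem_cons_of_mem _ hc')), hkeys]

theorem pvKfold_mono (xs : List (List (String × String))) (ks : List String) (x : String) (h : x ∈ ks) :
    x ∈ xs.foldl pvKStep ks := by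
  induction xs generalizing ks with
  | nil => exact h
  | cons c xs ih =>
    refine ih _ ?_
    unfold pvKStep
    split <;> simp [h]

theorem pvKfold_mem (xs : List (List (String × String))) (ks : List String) (c : List (String × String))
    (h : c ∈ xs) : pvId c ∈ xs.foldl pvKStep ks := by
  induction xs generalizing ks with
  | nil => cases h
  | cons x xs ih =>
    rcases List.mem_cons.mp h with rfl | h
    · refine pvKfold_mono xs _ _ ?_
      unfold pvKStep
      split <;> simp_all
    · exact ih _ h

theorem pvKfold_nodup (xs : List (List (String × String))) (ks : List String) (h : ks.Nodup) :
    (xs.foldl pvKStep ks).Nodup := by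
  induction xs generalizing ks with
  | nil => exact h
  | cons c xs ih =>
    refine ih _ ?_
    unfold pvKStep
    by_cases hm : pvId c ∈ ks
    · simpa [hm] using h
    · simp only [hm, if_false]
      exact h.append (List.nodup_singleton _) (List.disjoint_singleton.mpr hm)

theorem pvContains_eq_isSome {ν : Type} (d : PySem.Dict String ν) (k : String) :
    d.contains k = (d.get? k).isSome := by
  simp [PySem.Dict.contains, PySem.Dict.get?, List.isSome_find?]

theorem pvA_get?_some (k : String) (xs : List (List (String × String)))
    (d : PySem.Dict String (List (List (String × String)))) (v : List (List (String × String)))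
    (h : d.get? k = some v) :
    (xs.foldl pvStepA d).get? k = some (v ++ xs.filter (fun c => pvId c == k)) := by
  induction xs generalizing d v with
  | nil => simpa using h
  | cons c xs ih =>
    simp only [List.foldl_cons, List.filter_cons]
    by_cases hik : pvId c = k
    · have hc : d.contains (pvId c) = true := by
        rw [pvContains_eq_isSome, hik, h]; rfl
      have hstep : pvStepA d c = d.insert k (v ++ [c]) := by
        rw [pvStepA, if_pos hc, PySem.Dict.modify, hik, PySem.Dict.getD, h]
        rfl
      rw [hstep, ih _ (v ++ [c]) (PySem.Dict.get?_insert_self ..)]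
      simp [hik]
    · have hget : (pvStepA d c).get? k = d.get? k := by
        rw [pvStepA]
        split <;> [rw [PySem.Dict.modify]; skip] <;>
          exact PySem.Dict.get?_insert_of_ne _ _ (fun hkk => hik hkk.symm)
      have : (pvId c == k) = false := by simp [hik]
      rw [show List.foldl pvStepA (pvStepA d c) xs = List.foldl pvStepA (pvStepA d c) xs from rfl,
        ih (pvStepA d c) v (by rw [hget]; exact h)]
      simp [this]

theorem pvA_get?_none (k : String) (xs : List (List (String × String)))
    (d : PySem.Dict String (List (List (String × String)))) (h : d.get? k = none) :
    (xs.foldl pvStepA d).get? k =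
      if xs.any (fun c => pvId c == k) then some (xs.filter (fun c => pvId c == k)) else none := by
  induction xs generalizing d with
  | nil => simpa using h
  | cons c xs ih =>
    simp only [List.foldl_cons, List.any_cons, List.filter_cons]
    by_cases hik : pvId c = k
    · have hc : d.contains (pvId c) = false := by
        rw [pvContains_eq_isSome, hik, h]; rfl
      have hstep : pvStepA d c = d.insert k [c] := by
        rw [pvStepA, if_neg (by simp [hc]), hik]
      rw [hstep, pvA_get?_some k xs _ [c] (PySem.Dict.get?_insert_self ..)]
      simp [hik]
    · have hget : (pvStepA d c).get? k = d.get? k := by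
        rw [pvStepA]
        split <;> [rw [PySem.Dict.modify]; skip] <;>
          exact PySem.Dict.get?_insert_of_ne _ _ (fun hkk => hik hkk.symm)
      have hfalse : (pvId c == k) = false := by simp [hik]
      rw [ih _ (by rw [hget]; exact h)]
      simp [hfalse]

theorem pvSeed_get? (k : String) (xs : List (List (String × String)))
    (d : PySem.Dict String (List (List (String × String)))) :
    (xs.foldl (fun m c => m.insert (pvId c) []) d).get? k =
      if xs.any (fun c => pvId c == k) then some [] else d.get? k := by
  induction xs generalizing d with
  | nil => simp
  | cons c xs ih =>
    simp only [List.foldl_cons, List.any_cons]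
    by_cases hik : pvId c = k
    · rw [ih]
      simp only [hik, beq_self_eq_true, Bool.true_or, if_true]
      rw [PySem.Dict.get?_insert_self]
      exact ite_self _
    · have hfalse : (pvId c == k) = false := by simp [hik]
      rw [ih]
      simp only [hfalse, Bool.false_or]
      rw [PySem.Dict.get?_insert_of_ne _ _ (fun hkk => hik hkk.symm)]

theorem pvB_get?_some (k : String) (ys : List (List (String × String)))
    (m : PySem.Dict String (List (List (String × String)))) (b : List (List (String × String)))
    (h : m.get? k = some b) (hb : b.length ≤ 10) :
    (ys.foldl pvStepB m).get? k = some (b ++ (ys.filter (fun c => pvId c == k)).take (10 - b.length)) := by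
  induction ys generalizing m b with
  | nil => simpa using h
  | cons c ys ih =>
    simp only [List.foldl_cons, List.filter_cons]
    by_cases hik : pvId c = k
    · have hgetD : m.getD (pvId c) [] = b := by rw [hik, PySem.Dict.getD, h]; rfl
      by_cases hl : b.length < 10
      · have hstep : pvStepB m c = m.insert k (b ++ [c]) := by
          rw [pvStepB, hgetD, if_pos hl, hik]
        rw [hstep, ih _ (b ++ [c]) (PySem.Dict.get?_insert_self ..) (by simp; omega)]
        have harith : 10 - b.length = (10 - (b ++ [c]).length) + 1 := by simp; omega
        simp only [hik, beq_self_eq_true, if_true, harith, List.take_succ_cons, List.append_assoc,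
          List.length_append, List.length_cons, List.length_nil]
        rfl
      · have hstep : pvStepB m c = m := by rw [pvStepB, hgetD, if_neg hl]
        have hlen : b.length = 10 := by omega
        rw [hstep, ih _ b h hb]
        simp [hik, hlen]
    · have hget : (pvStepB m c).get? k = m.get? k := by
        rw [pvStepB]
        split
        · exact PySem.Dict.get?_insert_of_ne _ _ (fun hkk => hik hkk.symm)
        · rfl
      have hfalse : (pvId c == k) = false := by simp [hik]
      rw [ih _ b (by rw [hget]; exact h) hb]
      simp [hfalse]

theorem pvB_get?_skip (k : String) (ys : List (List (String × String)))
    (m : PySem.Dict String (List (List (String × String)))) (h : ∀ c ∈ ys, pvId c ≠ k) :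
    (ys.foldl pvStepB m).get? k = m.get? k := by
  induction ys generalizing m with
  | nil => rfl
  | cons c ys ih =>
    simp only [List.foldl_cons]
    have hget : (pvStepB m c).get? k = m.get? k := by
      rw [pvStepB]
      split
      · exact PySem.Dict.get?_insert_of_ne _ _ (fun hkk => (h c (List.mem_cons_self ..)) hkk.symm)
      · rfl
    rw [ih _ (fun c' hc' => h c' (List.mem_cons_of_mem _ hc')), hget]

-- ===== VERDICT (by name: the statement is the Claim_ definition above) =====
theorem get_comments_map_spec : Claim_equal_get_comments_map := by
  intro tic _ _
  show get_comments_map tic = get_comments_map_alt tic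
  show ((tic.foldl pvStepA PySem.Dict.empty).items.map (fun kv => (kv.1, PySem.List.sorted kv.2 pvUpd true))).map (fun kv => (kv.1, kv.2.take 10))
      = ((PySem.List.sorted tic pvUpd true).foldl pvStepB (tic.foldl (fun m comment => m.insert (pvId comment) []) PySem.Dict.empty)).items
  rw [List.map_map]
  have hA1 : ∀ (L : List (String × List (List (String × String)))),
      L.map ((fun kv => (kv.1, kv.2.take 10)) ∘ (fun kv => (kv.1, PySem.List.sorted kv.2 pvUpd true)))
        = L.map (fun kv => (kv.1, (PySem.List.sorted kv.2 pvUpd true).take 10)) := fun L => rfl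
  rw [hA1]
  set A1 := tic.foldl pvStepA PySem.Dict.empty with hA1def
  set m0 := tic.foldl (fun m comment => m.insert (pvId comment) []) PySem.Dict.empty with hm0def
  set srt := PySem.List.sorted tic pvUpd true with hsrtdef
  have hmemsrt : ∀ c ∈ srt, pvId c ∈ m0.items.map Prod.fst := by
    intro c hc
    rw [hm0def, pvSeed_keys]
    exact pvKfold_mem tic _ c ((PySem.List.mem_sorted tic pvUpd true c).mp hc)
  refine pvAssoc_ext _ _ ?_ ?_ ?_
  · rw [show (A1.items.map (fun kv => (kv.1, (PySem.List.sorted kv.2 pvUpd true).take 10))).map Prod.fst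
        = A1.items.map Prod.fst from by rw [List.map_map]; rfl]
    rw [hA1def, pvA_keys, pvB_keys srt m0 hmemsrt, hm0def, pvSeed_keys]
  · rw [show (A1.items.map (fun kv => (kv.1, (PySem.List.sorted kv.2 pvUpd true).take 10))).map Prod.fst
        = A1.items.map Prod.fst from by rw [List.map_map]; rfl]
    rw [hA1def, pvA_keys]
    exact pvKfold_nodup tic _ List.nodup_nil
  · intro k
    have hL : (PySem.Dict.mk (A1.items.map (fun kv => (kv.1, (PySem.List.sorted kv.2 pvUpd true).take 10)))).get? k
        = (A1.get? k).map (fun v => (PySem.List.sorted v pvUpd true).take 10) :=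
      pvGet?_map_val A1.items (fun v => (PySem.List.sorted v pvUpd true).take 10) k
    rw [hL]
    have hR : (PySem.Dict.mk (((srt.foldl pvStepB m0)).items)).get? k = (srt.foldl pvStepB m0).get? k := rfl
    rw [hR]
    by_cases hany : tic.any (fun c => pvId c == k) = true
    · have hAv : A1.get? k = some (tic.filter (fun c => pvId c == k)) := by
        rw [hA1def, pvA_get?_none k tic PySem.Dict.empty rfl, if_pos hany]
      have hm0 : m0.get? k = some [] := by
        rw [hm0def, pvSeed_get?, if_pos hany]
      rw [hAv, pvB_get?_some k srt m0 [] hm0 (by simp)]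
      rw [hsrtdef, pvFilter_sorted]
      simp
    · have hAv : A1.get? k = none := by
        rw [hA1def, pvA_get?_none k tic PySem.Dict.empty rfl, if_neg hany]
      have hm0 : m0.get? k = none := by
        rw [hm0def, pvSeed_get?, if_neg hany]
        rfl
      have hskip : ∀ c ∈ srt, pvId c ≠ k := by
        intro c hc hck
        exact hany (List.any_eq_true.mpr ⟨c, (PySem.List.mem_sorted tic pvUpd true c).mp hc, by simp [hck]⟩)
      rw [hAv, pvB_get?_skip k srt m0 hskip, hm0]
      rfl
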